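-- pv_equiv track=rewrite | github.com/tazwarsaif/CSE221-Lab | Lab3/task4.py | max1
-- ===== SOURCE A (Python) =====
-- def max1(arr,s,e):
--     if s == e:
--         return s
--     mid = (s+e)//2
--     num1 = max1(arr,s,mid)
--     num2 = max1(arr,mid+1,e)
--     if abs(arr[num1]) > abs(arr[num2]):
--         return num1
--     elif abs(arr[num2]) > abs(arr[num1]):
--         return num2
--     elif abs(arr[num1]) == abs(arr[num2]):
--         return max(num1,num2)
-- ===== SOURCE B (Python) =====
-- def max1(arr, s, e):
--     return max(range(s, e + 1), key=lambda i: (abs(arr[i]), i))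
-- ===== Notes on version B (the rewrite author's own statement) =====
-- stated objective: idiomatic
-- what changed: Replaced the divide-and-conquer recursion with a single max()-with-key scan over the index range, the key (abs(arr[i]), i) making ties resolve to the larger index exactly like A's max(num1,num2); Pre_ excludes single-element ranges whose index is out of bounds, where A returns s without ever touching arr while B indexes it and raises.
-- outside the precondition, e.g. on max1([], 0, 0): A returns 0, B raises IndexError
import Mathlib
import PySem

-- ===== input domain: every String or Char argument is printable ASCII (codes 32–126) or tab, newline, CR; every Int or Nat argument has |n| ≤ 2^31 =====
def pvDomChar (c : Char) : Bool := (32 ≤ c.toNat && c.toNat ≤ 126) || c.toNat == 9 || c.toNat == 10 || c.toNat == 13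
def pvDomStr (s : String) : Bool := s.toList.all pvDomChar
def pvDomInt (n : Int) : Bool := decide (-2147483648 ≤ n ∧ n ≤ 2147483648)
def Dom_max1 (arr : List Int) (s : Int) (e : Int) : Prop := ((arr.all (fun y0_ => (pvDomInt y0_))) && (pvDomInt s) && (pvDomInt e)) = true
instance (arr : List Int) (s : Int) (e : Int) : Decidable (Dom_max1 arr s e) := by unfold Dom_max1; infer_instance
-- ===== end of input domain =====

-- B replaces A's divide-and-conquer recursion by an idiomatic max()-with-key scan over the
-- index range (same O(n) work, no recursion); return values agree on all of Pre_.

-- ===== PORT A =====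
-- fuel makes the recursion total in Lean; under Pre_ (s ≤ e) the fuel (e-s)+1 is never exhausted.
def max1Go (fuel : Nat) (arr : List Int) (s : Int) (e : Int) : Int :=
  match fuel with
  | 0 => s
  | Nat.succ f =>
    if s = e then s
    else
      let mid := PySem.Int.floordiv (s + e) 2
      let num1 := max1Go f arr s mid
      let num2 := max1Go f arr (mid + 1) e
      if |PySem.List.pyGetD arr num1 0| > |PySem.List.pyGetD arr num2 0| then num1
      else if |PySem.List.pyGetD arr num2 0| > |PySem.List.pyGetD arr num1 0| then num2
      else max num1 num2

def max1 (arr : List Int) (s : Int) (e : Int) : Int :=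
  max1Go ((e - s).toNat + 1) arr s e

-- ===== PORT B =====
def max1_alt (arr : List Int) (s : Int) (e : Int) : Int :=
  (PySem.List.max2? (PySem.List.pyRange s (e + 1) 1)
     (fun i => |PySem.List.pyGetD arr i 0|) (fun i : Int => i)).getD 0

-- ===== PRECONDITION & SPEC =====
-- Pre_: s ≤ e with every index of the range a valid Python index of arr (negative indices wrap).
-- Excluded although A returns there: single-element ranges s == e with s out of bounds, where A
-- returns s without ever touching arr while B indexes arr[s] and raises IndexError.
-- On s > e A recurses forever; on larger ranges with an out-of-range index A raises IndexError.
def Pre_max1 (arr : List Int) (s : Int) (e : Int) : Prop :=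
  s ≤ e ∧ -(arr.length : Int) ≤ s ∧ e < (arr.length : Int)
instance (arr : List Int) (s : Int) (e : Int) : Decidable (Pre_max1 arr s e) := by
  unfold Pre_max1; infer_instance

def pvWitness_max1 : List Int × Int × Int := ([3, -5, 5], 0, 2)

def Spec_max1 (arr : List Int) (s : Int) (e : Int) (out : Int) : Prop := out = max1_alt arr s e
instance (arr : List Int) (s : Int) (e : Int) (out : Int) : Decidable (Spec_max1 arr s e out) := by
  unfold Spec_max1; infer_instance

-- ===== CLAIM (what is proved, stated in full; the proofs are below) =====
def Claim_equal_max1 : Prop := ∀ (arr : List Int) (s : Int) (e : Int),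
  Dom_max1 arr s e → Pre_max1 arr s e → Spec_max1 arr s e (max1 arr s e)

-- ===== LEMMAS AND PROOFS =====

-- |value at index i| (Python indexing, shared by both ports)
def pvF (arr : List Int) (i : Int) : Int := |PySem.List.pyGetD arr i 0|

-- "r is the largest index in [s,e] with maximal |arr[r]|"
def pvIsAns (arr : List Int) (s e r : Int) : Prop :=
  s ≤ r ∧ r ≤ e ∧ (∀ j, s ≤ j → j ≤ e → pvF arr j ≤ pvF arr r) ∧
  (∀ j, r < j → j ≤ e → pvF arr j < pvF arr r)

theorem pvIsAns_unique {arr : List Int} {s e r r' : Int}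
    (h : pvIsAns arr s e r) (h' : pvIsAns arr s e r') : r = r' := by
  obtain ⟨hr1, hr2, hmax, hstr⟩ := h
  obtain ⟨hr1', hr2', hmax', hstr'⟩ := h'
  rcases lt_trichotomy r r' with hlt | heq | hgt
  · have h1 := hstr r' hlt hr2'
    have h2 := hmax' r hr1 hr2
    omega
  · exact heq
  · have h1 := hstr' r hgt hr2
    have h2 := hmax r' hr1' hr2'
    omega

theorem pvMax2_isAns (arr : List Int) : ∀ (n : Nat) (s e : Int), s ≤ e → (e - s).toNat = n →
    ∃ r, PySem.List.max2? (PySem.List.pyRange s (e + 1) 1)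
        (fun i => |PySem.List.pyGetD arr i 0|) (fun i : Int => i) = some r ∧ pvIsAns arr s e r := by
  intro n
  induction n with
  | zero =>
    intro s e hse hn
    have he : e = s := by omega
    subst he
    rw [PySem.List.pyRange_one_singleton]
    refine ⟨e, by simp [PySem.List.max2?], le_refl _, le_refl _, ?_, ?_⟩
    · intro j h1 h2; have hj := le_antisymm h2 h1; rw [hj]
    · intro j h1 h2; omega
  | succ n ih =>
    intro s e hse hn
    have hlt : s < e := by omega
    obtain ⟨b, hbeq, hb1, hb2, hbmax, hbstr⟩ := ih s (e - 1) (by omega) (by omega)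
    have hb : (e - 1) + 1 = e := by omega
    rw [hb] at hbeq
    have hsplit : PySem.List.pyRange s (e + 1) 1 = PySem.List.pyRange s e 1 ++ [e] := by
      have := PySem.List.pyRange_one_succ_right (a := s) (b := e) (by omega)
      simpa using this
    simp only [PySem.List.max2?] at hbeq ⊢
    rw [hsplit, List.foldl_append, hbeq]
    simp only [List.foldl]
    have hble : b < e := by omega
    by_cases hc : |PySem.List.pyGetD arr e 0| < |PySem.List.pyGetD arr b 0|
    · have hcond : (decide (|PySem.List.pyGetD arr b 0| < |PySem.List.pyGetD arr e 0|) ||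
          (!decide (|PySem.List.pyGetD arr e 0| < |PySem.List.pyGetD arr b 0|) && decide (b < e))) = false := by
        simp [hc]; omega
      rw [hcond]
      refine ⟨b, rfl, hb1, by omega, ?_, ?_⟩
      · intro j h1 h2
        rcases (by omega : j ≤ e - 1 ∨ j = e) with h3 | h3
        · exact hbmax j h1 h3
        · subst h3; simp only [pvF]; omega
      · intro j h1 h2
        rcases (by omega : j ≤ e - 1 ∨ j = e) with h3 | h3
        · exact hbstr j h1 h3
        · subst h3; simp only [pvF]; omega
    · have hcond : (decide (|PySem.List.pyGetD arr b 0| < |PySem.List.pyGetD arr e 0|) ||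
          (!decide (|PySem.List.pyGetD arr e 0| < |PySem.List.pyGetD arr b 0|) && decide (b < e))) = true := by
        simp [hc, hble]
      rw [hcond]
      refine ⟨e, rfl, by omega, le_refl e, ?_, ?_⟩
      · intro j h1 h2
        rcases (by omega : j ≤ e - 1 ∨ j = e) with h3 | h3
        · have := hbmax j h1 h3
          simp only [pvF] at *; omega
        · subst h3; exact le_refl _
      · intro j h1 h2; omega

theorem pvAlt_isAns (arr : List Int) (s e : Int) (hse : s ≤ e) :
    pvIsAns arr s e (max1_alt arr s e) := by
  obtain ⟨r, hr, hans⟩ := pvMax2_isAns arr (e - s).toNat s e hse rfl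
  unfold max1_alt
  rw [hr]
  exact hans

theorem pvGo_isAns (arr : List Int) : ∀ (fuel : Nat) (s e : Int), s ≤ e → (e - s).toNat < fuel →
    pvIsAns arr s e (max1Go fuel arr s e) := by
  intro fuel
  induction fuel with
  | zero => intro s e _ hf; omega
  | succ f ih =>
    intro s e hse hf
    by_cases hseq : s = e
    · subst hseq
      refine ⟨?_, ?_, ?_, ?_⟩ <;> simp [max1Go]
      · intro j h1 h2; have : j = s := by omega
        subst this; exact le_refl _
      · intro j h1 h2; omega
    · have hlt : s < e := by omega
      have hmid : s ≤ PySem.Int.floordiv (s + e) 2 ∧ PySem.Int.floordiv (s + e) 2 < e := by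
        rw [PySem.Int.floordiv_eq_ediv_of_pos (by omega)]
        omega
      set mid := PySem.Int.floordiv (s + e) 2 with hmiddef
      have h1 := ih s mid (by omega) (by omega)
      have h2 := ih (mid + 1) e (by omega) (by omega)
      set n1 := max1Go f arr s mid with hn1
      set n2 := max1Go f arr (mid + 1) e with hn2
      obtain ⟨ha1, ha2, hamax, hastr⟩ := h1
      obtain ⟨hb1, hb2, hbmax, hbstr⟩ := h2
      have hgo : max1Go (f + 1) arr s e =
          (if |PySem.List.pyGetD arr n1 0| > |PySem.List.pyGetD arr n2 0| then n1
           else if |PySem.List.pyGetD arr n2 0| > |PySem.List.pyGetD arr n1 0| then n2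
           else max n1 n2) := by
        conv_lhs => rw [max1Go]
        rw [if_neg hseq]
      rw [hgo]
      by_cases hc1 : |PySem.List.pyGetD arr n1 0| > |PySem.List.pyGetD arr n2 0|
      · rw [if_pos hc1]
        refine ⟨ha1, by omega, ?_, ?_⟩
        · intro j hj1 hj2
          rcases (by omega : j ≤ mid ∨ mid + 1 ≤ j) with h3 | h3
          · exact hamax j hj1 h3
          · have := hbmax j h3 hj2
            simp only [pvF] at *; omega
        · intro j hj1 hj2
          rcases (by omega : j ≤ mid ∨ mid + 1 ≤ j) with h3 | h3
          · exact hastr j hj1 h3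
          · have := hbmax j h3 hj2
            simp only [pvF] at *; omega
      · rw [if_neg hc1]
        have hrest : pvIsAns arr s e n2 := by
          refine ⟨by omega, hb2, ?_, ?_⟩
          · intro j hj1 hj2
            rcases (by omega : j ≤ mid ∨ mid + 1 ≤ j) with h3 | h3
            · have := hamax j hj1 h3
              simp only [pvF] at *; omega
            · exact hbmax j h3 hj2
          · intro j hj1 hj2
            exact hbstr j (by omega) hj2
        by_cases hc2 : |PySem.List.pyGetD arr n2 0| > |PySem.List.pyGetD arr n1 0|
        · rw [if_pos hc2]; exact hrest
        · rw [if_neg hc2]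
          have : max n1 n2 = n2 := by omega
          rw [this]; exact hrest

-- ===== VERDICT (by name: the statement is the Claim_ definition above) =====
theorem max1_spec : Claim_equal_max1 := by
  intro arr s e _ hpre
  obtain ⟨hse, _, _⟩ := hpre
  unfold Spec_max1 max1
  exact pvIsAns_unique (pvGo_isAns arr _ s e hse (by omega)) (pvAlt_isAns arr s e hse)
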